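-- pv_equiv track=rewrite | github.com/Markodin01/mapper-reducer | train_model.py | reducer_to_dict
-- ===== SOURCE A (Python) =====
-- def reducer_to_dict(mapped_data):
--     aggregated_data_title = {}
--     aggregated_data_text = {}
--
--     # Process title words
--     for title_word in mapped_data[0]:  # Assuming mapped_data[0] is the list of title words
--         key = title_word[0]  # The key is the word itself
--         count = title_word[1]
--         if key in aggregated_data_title:
--             aggregated_data_title[key] += count
--         else:
--             aggregated_data_title[key] = count
--
--     # Process trigrams
--     for trigram in mapped_data[1]:  # Assuming mapped_data[1] is the list of trigrams
--         # Sort the words in the trigram to make the order irrelevant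
--         words_sorted = ','.join(sorted(trigram[0].split(',')))
--         count = trigram[1]
--         if words_sorted in aggregated_data_text:
--             aggregated_data_text[words_sorted] += count
--         else:
--             aggregated_data_text[words_sorted] = count
--
--     return aggregated_data_title, aggregated_data_text
-- ===== SOURCE B (Python) =====
-- def _aggregate(kcs):
--     order = list(dict.fromkeys(k for k, _ in kcs))
--     return {k: sum(c for k2, c in kcs if k2 == k) for k in order}
--
--
-- def reducer_to_dict(mapped_data):
--     titles = _aggregate([(k, c) for k, c in mapped_data[0]])
--     texts = _aggregate([(','.join(sorted(k.split(','))), c)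
--                         for k, c in mapped_data[1]])
--     return titles, texts
-- ===== Notes on version B (the rewrite author's own statement) =====
-- stated objective: alternative
-- what changed: Replaces A's single-pass conditional dict accumulation with a two-phase scheme: first recover the first-occurrence key order with dict.fromkeys, then build each entry by summing all counts whose (normalized) key matches, via a dict comprehension.
import Mathlib
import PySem

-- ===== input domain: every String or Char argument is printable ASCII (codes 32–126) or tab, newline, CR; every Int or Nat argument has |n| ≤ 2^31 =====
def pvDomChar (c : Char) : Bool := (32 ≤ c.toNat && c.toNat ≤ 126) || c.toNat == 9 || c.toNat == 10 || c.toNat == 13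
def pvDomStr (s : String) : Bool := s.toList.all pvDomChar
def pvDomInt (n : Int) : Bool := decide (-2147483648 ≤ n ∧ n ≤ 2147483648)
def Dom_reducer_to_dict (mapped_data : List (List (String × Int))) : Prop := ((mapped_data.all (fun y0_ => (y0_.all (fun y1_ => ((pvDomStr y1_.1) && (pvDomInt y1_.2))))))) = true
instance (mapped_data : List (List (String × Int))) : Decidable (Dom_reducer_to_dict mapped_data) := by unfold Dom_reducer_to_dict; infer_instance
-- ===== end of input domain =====

-- B changes the aggregation shape only (first-occurrence key order + per-key sums instead of
-- A's one-pass dict accumulation); same return value, no speed claim.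

-- ===== PORT A =====
-- ','.join(sorted(s.split(','))); the separator "," is non-empty, so PySem.Str.split? is always `some`
def triKey (s : String) : String :=
  PySem.Str.join "," (PySem.List.sorted ((PySem.Str.split? s ",").getD []) (fun x => x) false)

def reducer_to_dict (mapped_data : List (List (String × Int))) : (List (String × Int)) × (List (String × Int)) :=
  match PySem.List.pyGet? mapped_data 0, PySem.List.pyGet? mapped_data 1 with
  | some l0, some l1 =>
    -- for title_word in mapped_data[0]: ...
    let aggregated_data_title : PySem.Dict String Int :=
      l0.foldl (fun d title_word =>
        let key := title_word.1
        let count := title_word.2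
        if d.contains key then d.insert key (d.getD key 0 + count)
        else d.insert key count) PySem.Dict.empty
    -- for trigram in mapped_data[1]: ...
    let aggregated_data_text : PySem.Dict String Int :=
      l1.foldl (fun d trigram =>
        let words_sorted := triKey trigram.1
        let count := trigram.2
        if d.contains words_sorted then d.insert words_sorted (d.getD words_sorted 0 + count)
        else d.insert words_sorted count) PySem.Dict.empty
    (aggregated_data_title.items, aggregated_data_text.items)
  | _, _ => ([], [])   -- IndexError in Python: excluded by Pre_

-- ===== PORT B =====
-- ','.join(sorted(k.split(','))) as written in Source B (B's own copy of the key normalization)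
def pvNormKey (s : String) : String :=
  PySem.Str.join "," (PySem.List.sorted ((PySem.Str.split? s ",").getD []) (fun x => x) false)

-- _aggregate(kcs): order = list(dict.fromkeys(k for k,_ in kcs)); {k: sum(c for k2,c in kcs if k2==k) for k in order}
def pvAggregate (kcs : List (String × Int)) : List (String × Int) :=
  let order := PySem.List.dedup (kcs.map (fun p => p.1))
  order.map (fun k => (k, ((kcs.filter (fun p => p.1 == k)).map (fun p => p.2)).sum))

def reducer_to_dict_alt (mapped_data : List (List (String × Int))) : (List (String × Int)) × (List (String × Int)) :=
  match PySem.List.pyGet? mapped_data 0 with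
  | none => ([], [])   -- IndexError in Python: excluded by Pre_
  | some l0 =>
    match PySem.List.pyGet? mapped_data 1 with
    | none => ([], [])   -- IndexError in Python: excluded by Pre_
    | some l1 =>
      let titles := pvAggregate (l0.map (fun p => (p.1, p.2)))
      let texts := pvAggregate (l1.map (fun p => (pvNormKey p.1, p.2)))
      (titles, texts)

-- ===== PRECONDITION & SPEC =====
-- Python A evaluates mapped_data[0] and mapped_data[1]: it raises IndexError when fewer
-- than two inner lists are given; exactly those inputs are excluded.
def Pre_reducer_to_dict (mapped_data : List (List (String × Int))) : Prop :=
  2 ≤ mapped_data.length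
instance (mapped_data : List (List (String × Int))) : Decidable (Pre_reducer_to_dict mapped_data) := by unfold Pre_reducer_to_dict; infer_instance
def pvWitness_reducer_to_dict : (List (List (String × Int))) :=
  [[("a", 1), ("b", 2), ("a", 3)], [("y,x", 1), ("x,y", 2)]]
def Spec_reducer_to_dict (mapped_data : List (List (String × Int))) (out : (List (String × Int)) × (List (String × Int))) : Prop := out = reducer_to_dict_alt mapped_data
instance (mapped_data : List (List (String × Int))) (out : (List (String × Int)) × (List (String × Int))) : Decidable (Spec_reducer_to_dict mapped_data out) := by unfold Spec_reducer_to_dict; infer_instance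

-- ===== CLAIM (what is proved, stated in full; the proofs are below) =====
def Claim_equal_reducer_to_dict : Prop := ∀ (mapped_data : List (List (String × Int))), Dom_reducer_to_dict mapped_data → Pre_reducer_to_dict mapped_data → Spec_reducer_to_dict mapped_data (reducer_to_dict mapped_data)

-- ===== LEMMAS AND PROOFS =====

-- A's loop body, with the key normalization abstracted as f
def pvStep (f : String → String) (d : PySem.Dict String Int) (p : String × Int) : PySem.Dict String Int :=
  let key := f p.1
  let count := p.2
  if d.contains key then d.insert key (d.getD key 0 + count)
  else d.insert key count

lemma pvKeys_step (f : String → String) (d : PySem.Dict String Int) (p : String × Int) :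
    (pvStep f d p).keys = PySem.Set.add d.keys (f p.1) := by
  by_cases h : d.contains (f p.1) = true
  · have hm : f p.1 ∈ d.keys := (PySem.Dict.contains_iff_mem_keys _ _).mp h
    simp [pvStep, h, PySem.Dict.keys_insert_of_contains d _ h, PySem.Set.add, hm]
  · have h' : d.contains (f p.1) = false := by simpa using h
    have hm : f p.1 ∉ d.keys := fun hmem => h ((PySem.Dict.contains_iff_mem_keys _ _).mpr hmem)
    simp [pvStep, h', PySem.Dict.keys_insert_of_not_contains d _ h', PySem.Set.add, hm]

lemma pvKeys_fold (f : String → String) (ps : List (String × Int)) (d : PySem.Dict String Int) :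
    (ps.foldl (pvStep f) d).keys = PySem.Set.update d.keys (ps.map (fun p => f p.1)) := by
  induction ps generalizing d with
  | nil => simp [PySem.Set.update]
  | cons p rest ih =>
      simp only [List.foldl_cons, List.map_cons, ih, pvKeys_step, PySem.Set.update]

lemma pvGetD_fold (f : String → String) (ps : List (String × Int)) (d : PySem.Dict String Int) (k : String) :
    (ps.foldl (pvStep f) d).getD k 0
      = d.getD k 0 + ((ps.filter (fun p => f p.1 == k)).map (fun p => p.2)).sum := by
  induction ps generalizing d with
  | nil => simp
  | cons p rest ih =>
      simp only [List.foldl_cons, ih]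
      by_cases hk : f p.1 = k
      · have hstep : (pvStep f d p).getD k 0 = d.getD k 0 + p.2 := by
          unfold pvStep
          simp only [hk]
          by_cases h : d.contains k = true
          · simp [h]
          · have h' : d.contains k = false := by simpa using h
            simp [h', PySem.Dict.getD_of_not_contains d _ h']
        simp only [hstep, List.filter_cons, hk]
        simp
        ring
      · have hk' : ¬ (k = f p.1) := fun hh => hk hh.symm
        have hstep : (pvStep f d p).getD k 0 = d.getD k 0 := by
          unfold pvStep
          by_cases h : d.contains (f p.1) = true <;>
            simp [h, PySem.Dict.getD_insert, hk']
        simp [hstep, hk]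

lemma pvAgg_eq (f : String → String) (ps : List (String × Int)) :
    (ps.foldl (pvStep f) PySem.Dict.empty).items = pvAggregate (ps.map (fun p => (f p.1, p.2))) := by
  have hkeys : (ps.foldl (pvStep f) PySem.Dict.empty).keys
      = PySem.List.dedup (ps.map (fun p => f p.1)) := by
    rw [pvKeys_fold]
    simp [PySem.Set.update, PySem.Dict.keys_empty, ← PySem.Set.ofList_eq_foldl]
  have hnd : (ps.foldl (pvStep f) PySem.Dict.empty).keys.Nodup := by
    rw [hkeys]; exact PySem.List.nodup_dedup _
  rw [PySem.Dict.items_eq_map_keys _ hnd 0, hkeys]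
  unfold pvAggregate
  simp only [List.map_map]
  have hord : (List.map ((fun p => p.1) ∘ fun p : String × Int => (f p.1, p.2)) ps)
      = ps.map (fun p => f p.1) := by simp [Function.comp]
  rw [hord]
  apply List.map_congr_left
  intro k _
  rw [pvGetD_fold]
  simp only [PySem.Dict.getD_empty, zero_add]
  congr 1
  simp only [List.filter_map, List.map_map]
  rfl

-- ===== VERDICT (by name: the statement is the Claim_ definition above) =====
theorem reducer_to_dict_spec : Claim_equal_reducer_to_dict := by
  intro md _ hpre
  obtain ⟨x, y, rest, rfl⟩ : ∃ x y rest, md = x :: y :: rest := by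
    match md, hpre with
    | x :: y :: rest, _ => exact ⟨x, y, rest, rfl⟩
  have h0 : PySem.List.pyGet? (x :: y :: rest) (0 : Int) = some x := by
    simp [PySem.List.pyGet?, PySem.List.pyIdx?,
      show ((0:Int) ≤ (rest.length:Int) + 1) from by omega]
  have h1 : PySem.List.pyGet? (x :: y :: rest) (1 : Int) = some y := by
    simp [PySem.List.pyGet?, PySem.List.pyIdx?]
  unfold Spec_reducer_to_dict reducer_to_dict reducer_to_dict_alt
  simp only [h0, h1]
  have hkey : triKey = pvNormKey := rfl
  exact congrArg₂ Prod.mk (pvAgg_eq (fun s => s) x) (hkey ▸ pvAgg_eq triKey y)
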